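-- pv_equiv track=rewrite | github.com/cz-fish/advent-of-code | 2022/18.py | count_outer_sides
-- ===== SOURCE A (Python) =====
-- from collections import deque
--
-- SIX_DIRECTIONS = [[0, 0, 1], [0, 1, 0], [1, 0, 0], [0, 0, -1], [0, -1, 0], [-1, 0, 0]]
--
-- def count_outer_sides(cloud, mins, maxs):
--     count = 0
--     # Flood fill from 1 outside the min/max coords
--     visited = set()
--     q = deque()
--     start = (mins[0]-1, mins[1]-1, mins[2]-1)
--     q.append(start)
--     visited.add(start)
--     while q:
--         p = q.popleft()
--         for step in SIX_DIRECTIONS: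
--             a = (p[0] + step[0], p[1] + step[1], p[2] + step[2])
--             if a[0] < mins[0]-1 or a[1] < mins[1]-1 or a[2] < mins[2]-1 \
--                 or a[0] > maxs[0]+1 or a[1] > maxs[1]+1 or a[2] > maxs[2]+1:
--                 continue
--             if a in visited:
--                 continue
--             if a in cloud:
--                 count += 1
--             else:
--                 q.append(a)
--                 visited.add(a)
--     return count
-- ===== SOURCE B (Python) =====
-- from collections import deque
--
-- SIX_DIRECTIONS = [[0, 0, 1], [0, 1, 0], [1, 0, 0], [0, 0, -1], [0, -1, 0], [-1, 0, 0]]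
--
-- def count_outer_sides(cloud, mins, maxs):
--     lo = (mins[0] - 1, mins[1] - 1, mins[2] - 1)
--     hi = (maxs[0] + 1, maxs[1] + 1, maxs[2] + 1)
--
--     def in_box(c):
--         return lo[0] <= c[0] <= hi[0] and lo[1] <= c[1] <= hi[1] and lo[2] <= c[2] <= hi[2]
--
--     cloudset = set(cloud)
--     # Flood fill: collect the cells of the expanded box reachable from its corner.
--     exterior = {lo}
--     q = deque([lo])
--     while q:
--         p = q.popleft()
--         for step in SIX_DIRECTIONS:
--             a = (p[0] + step[0], p[1] + step[1], p[2] + step[2])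
--             if in_box(a) and a not in exterior and a not in cloudset:
--                 exterior.add(a)
--                 q.append(a)
--     # Second pass: for each solid cell (a cloud cell of the box not swallowed by the
--     # flood fill), count its faces touching the exterior.
--     total = 0
--     for c in cloudset:
--         if in_box(c) and c not in exterior:
--             for step in SIX_DIRECTIONS:
--                 if (c[0] + step[0], c[1] + step[1], c[2] + step[2]) in exterior:
--                     total += 1
--     return total
-- ===== Notes on version B (the rewrite author's own statement) =====
-- stated objective: alternative
-- what changed: B keeps the iterative flood fill but strips the counting out of it: the fill only collects the set of exterior cells of the one-cell-expanded box, and a separate second pass counts, from the solid side, each solid cloud cell's faces that touch the exterior.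
-- outside the precondition, e.g. on count_outer_sides(set(), [29, -2, -44], [3]): A returns 0, B raises IndexError
import Mathlib
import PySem

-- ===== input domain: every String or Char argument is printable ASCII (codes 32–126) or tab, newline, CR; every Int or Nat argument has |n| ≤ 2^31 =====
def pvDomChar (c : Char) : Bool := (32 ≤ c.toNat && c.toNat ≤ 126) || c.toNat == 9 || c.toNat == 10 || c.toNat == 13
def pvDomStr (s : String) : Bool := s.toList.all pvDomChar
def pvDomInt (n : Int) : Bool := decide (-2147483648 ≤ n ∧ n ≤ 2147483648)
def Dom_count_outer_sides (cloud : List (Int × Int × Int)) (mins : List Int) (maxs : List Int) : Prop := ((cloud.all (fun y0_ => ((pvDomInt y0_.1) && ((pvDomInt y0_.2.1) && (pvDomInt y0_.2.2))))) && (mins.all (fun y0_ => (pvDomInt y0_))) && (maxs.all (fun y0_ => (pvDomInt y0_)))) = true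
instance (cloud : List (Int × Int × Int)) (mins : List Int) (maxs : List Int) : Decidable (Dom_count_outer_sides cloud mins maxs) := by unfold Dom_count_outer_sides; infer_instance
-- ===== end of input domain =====

-- B keeps A's iterative flood fill but strips the counting out of it: the fill only collects the
-- exterior cells, and a separate second pass counts, from the solid side, the faces of solid
-- cloud cells touching the exterior (objective: alternative decomposition, same asymptotic cost).

abbrev PVC := Int × Int × Int

-- lexicographic comparator for cells (visited/exterior sets are membership-only Python sets,
-- never iterated; they are ported as Std.TreeSet, which is exact for membership)
abbrev pvCmp : PVC → PVC → Ordering :=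
  compareLex (compareOn (·.1)) (compareLex (compareOn (·.2.1)) (compareOn (·.2.2)))

-- SIX_DIRECTIONS (shared module constant of both Pythons)
def pvDirs : List PVC := [(0,0,1), (0,1,0), (1,0,0), (0,0,-1), (0,-1,0), (-1,0,0)]

-- a = (p[0]+step[0], p[1]+step[1], p[2]+step[2])
def pvAdd (p d : PVC) : PVC := (p.1 + d.1, p.2.1 + d.2.1, p.2.2 + d.2.2)

-- fuel bound for the while loops (totality device only: 7·|expanded box| + 1)
def pvFuel (lo hi : PVC) : Nat :=
  7 * ((hi.1 + 1 - lo.1).toNat * ((hi.2.1 + 1 - lo.2.1).toNat * (hi.2.2 + 1 - lo.2.2).toNat)) + 1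

-- ===== PORT A =====
-- A's out-of-expanded-box test (the big 'or' guarding 'continue')
def pvOut (m0 m1 m2 M0 M1 M2 : Int) (a : PVC) : Bool :=
  a.1 < m0 - 1 || a.2.1 < m1 - 1 || a.2.2 < m2 - 1 ||
  a.1 > M0 + 1 || a.2.1 > M1 + 1 || a.2.2 > M2 + 1

-- body of A's 'for step in SIX_DIRECTIONS' on state (count, visited, q)
def pvStepA (cloud : List PVC) (m0 m1 m2 M0 M1 M2 : Int) (p : PVC)
    (s : Int × Std.TreeSet PVC pvCmp × List PVC) (d : PVC) : Int × Std.TreeSet PVC pvCmp × List PVC :=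
  let a := pvAdd p d
  if pvOut m0 m1 m2 M0 M1 M2 a then s
  else if s.2.1.contains a then s
  else if a ∈ cloud then (s.1 + 1, s.2.1, s.2.2)
  else (s.1, s.2.1.insert a, s.2.2 ++ [a])

-- A's 'while q' loop
def pvLoopA (cloud : List PVC) (m0 m1 m2 M0 M1 M2 : Int) :
    Nat → (Int × Std.TreeSet PVC pvCmp × List PVC) → (Int × Std.TreeSet PVC pvCmp × List PVC)
  | 0, s => s
  | fuel+1, s =>
    match s.2.2 with
    | [] => s
    | p :: rest =>
      pvLoopA cloud m0 m1 m2 M0 M1 M2 fuel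
        (pvDirs.foldl (pvStepA cloud m0 m1 m2 M0 M1 M2 p) (s.1, s.2.1, rest))

def count_outer_sides (cloud : List (Int × Int × Int)) (mins : List Int) (maxs : List Int) : Int :=
  let m0 := PySem.List.pyGetD mins 0 0
  let m1 := PySem.List.pyGetD mins 1 0
  let m2 := PySem.List.pyGetD mins 2 0
  let M0 := PySem.List.pyGetD maxs 0 0
  let M1 := PySem.List.pyGetD maxs 1 0
  let M2 := PySem.List.pyGetD maxs 2 0
  let start : PVC := (m0 - 1, m1 - 1, m2 - 1)
  (pvLoopA cloud m0 m1 m2 M0 M1 M2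
      (pvFuel start (M0 + 1, M1 + 1, M2 + 1))
      (0, (Std.TreeSet.empty : Std.TreeSet PVC pvCmp).insert start, [start])).1

-- ===== PORT B =====
-- B's in_box helper
def pvInB (lo hi c : PVC) : Bool :=
  decide (lo.1 ≤ c.1 ∧ c.1 ≤ hi.1) && decide (lo.2.1 ≤ c.2.1 ∧ c.2.1 ≤ hi.2.1) &&
  decide (lo.2.2 ≤ c.2.2 ∧ c.2.2 ≤ hi.2.2)

-- body of B's flood-fill inner loop on state (exterior, q)
def pvStepB (cloudset : List PVC) (lo hi p : PVC)
    (s : Std.TreeSet PVC pvCmp × List PVC) (d : PVC) : Std.TreeSet PVC pvCmp × List PVC :=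
  let a := pvAdd p d
  if pvInB lo hi a && !s.1.contains a && !decide (a ∈ cloudset) then
    (s.1.insert a, s.2 ++ [a])
  else s

-- B's 'while q' loop
def pvLoopB (cloudset : List PVC) (lo hi : PVC) :
    Nat → (Std.TreeSet PVC pvCmp × List PVC) → (Std.TreeSet PVC pvCmp × List PVC)
  | 0, s => s
  | fuel+1, s =>
    match s.2 with
    | [] => s
    | p :: rest =>
      pvLoopB cloudset lo hi fuel (pvDirs.foldl (pvStepB cloudset lo hi p) (s.1, rest))

def count_outer_sides_alt (cloud : List (Int × Int × Int)) (mins : List Int) (maxs : List Int) : Int :=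
  let lo : PVC := (PySem.List.pyGetD mins 0 0 - 1, PySem.List.pyGetD mins 1 0 - 1, PySem.List.pyGetD mins 2 0 - 1)
  let hi : PVC := (PySem.List.pyGetD maxs 0 0 + 1, PySem.List.pyGetD maxs 1 0 + 1, PySem.List.pyGetD maxs 2 0 + 1)
  let cloudset : PySem.Set PVC := PySem.Set.ofList cloud
  let ext := (pvLoopB cloudset lo hi (pvFuel lo hi) ((Std.TreeSet.empty : Std.TreeSet PVC pvCmp).insert lo, [lo])).1
  cloudset.foldl
    (fun t c =>
      if pvInB lo hi c && !ext.contains c then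
        pvDirs.foldl (fun t d => if ext.contains (pvAdd c d) then t + 1 else t) t
      else t)
    0

-- ===== PRECONDITION & SPEC =====
-- Pre_ excludes mins/maxs shorter than 3: there A usually raises IndexError, and on the inputs
-- where A's short-circuited bound test happens to return before reading the missing entry
-- (e.g. mins[0]-1 > maxs[0]+1 with maxs = [3]), B's eager reading of all six bounds raises.
def Pre_count_outer_sides (cloud : List (Int × Int × Int)) (mins : List Int) (maxs : List Int) : Prop :=
  3 ≤ mins.length ∧ 3 ≤ maxs.length
instance (cloud : List (Int × Int × Int)) (mins : List Int) (maxs : List Int) : Decidable (Pre_count_outer_sides cloud mins maxs) := by unfold Pre_count_outer_sides; infer_instance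

def pvWitness_count_outer_sides : (List (Int × Int × Int)) × List Int × List Int :=
  ([(0, 0, 0)], [0, 0, 0], [0, 0, 0])

def Spec_count_outer_sides (cloud : List (Int × Int × Int)) (mins : List Int) (maxs : List Int) (out : Int) : Prop := out = count_outer_sides_alt cloud mins maxs
instance (cloud : List (Int × Int × Int)) (mins : List Int) (maxs : List Int) (out : Int) : Decidable (Spec_count_outer_sides cloud mins maxs out) := by unfold Spec_count_outer_sides; infer_instance

-- ===== CLAIM (what is proved, stated in full; the proofs are below) =====
def Claim_equal_count_outer_sides : Prop := ∀ (cloud : List (Int × Int × Int)) (mins : List Int) (maxs : List Int), Dom_count_outer_sides cloud mins maxs → Pre_count_outer_sides cloud mins maxs → Spec_count_outer_sides cloud mins maxs (count_outer_sides cloud mins maxs)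

-- ===== LEMMAS AND PROOFS =====

-- opposite direction
def pvNeg (d : PVC) : PVC := (-d.1, -d.2.1, -d.2.2)

-- bridge lemmas for the TreeSet-modelled Python sets
theorem pvCmp_eq_iff (a b : PVC) : pvCmp a b = Ordering.eq ↔ a = b := by
  rcases a with ⟨a1, a2, a3⟩; rcases b with ⟨b1, b2, b3⟩
  simp [pvCmp, compareLex, compareOn, Ordering.then_eq_eq, Prod.mk.injEq]

@[reducible] def pvLawfulEq : Std.LawfulEqCmp pvCmp where
  eq_of_compare := fun h => (pvCmp_eq_iff _ _).mp h

theorem pvT_mem_insert (t : Std.TreeSet PVC pvCmp) (k a : PVC) :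
    a ∈ t.insert k ↔ a = k ∨ a ∈ t := by
  rw [Std.TreeSet.mem_insert, pvCmp_eq_iff, eq_comm]

theorem pvT_contains_iff (t : Std.TreeSet PVC pvCmp) (a : PVC) :
    t.contains a = true ↔ a ∈ t := Std.TreeSet.mem_iff_contains.symm

theorem pvT_mem_toFinset (t : Std.TreeSet PVC pvCmp) (a : PVC) :
    a ∈ t.toList.toFinset ↔ a ∈ t := by
  haveI := pvLawfulEq
  simp [List.mem_toFinset, Std.TreeSet.mem_toList]

-- the expanded box as a Finset
noncomputable def pvBox (m0 m1 m2 M0 M1 M2 : Int) : Finset PVC :=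
  Finset.Icc (m0-1) (M0+1) ×ˢ (Finset.Icc (m1-1) (M1+1) ×ˢ Finset.Icc (m2-1) (M2+1))

-- number of faces of exterior cell e into non-seed cloud cells, as A counts them
def pvFaceZ (cloud : List PVC) (m0 m1 m2 M0 M1 M2 : Int) (e : PVC) : Int :=
  ((pvDirs.filter (fun d => !pvOut m0 m1 m2 M0 M1 M2 (pvAdd e d) &&
      decide (pvAdd e d ∈ cloud) && !decide (pvAdd e d = ((m0-1, m1-1, m2-1) : PVC)))).length : Int)

theorem pv_mem_box_iff (m0 m1 m2 M0 M1 M2 : Int) (x : PVC) :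
    x ∈ pvBox m0 m1 m2 M0 M1 M2 ↔ (!pvOut m0 m1 m2 M0 M1 M2 x) = true := by
  rcases x with ⟨x, y, z⟩
  simp [pvBox, pvOut, Finset.mem_product, Finset.mem_Icc, Bool.not_eq_true', Bool.or_eq_false_iff,
    decide_eq_false_iff_not]
  omega

theorem pv_inB_eq_not_out (m0 m1 m2 M0 M1 M2 : Int) (a : PVC) :
    pvInB (m0-1, m1-1, m2-1) (M0+1, M1+1, M2+1) a = !pvOut m0 m1 m2 M0 M1 M2 a := by
  rcases a with ⟨x, y, z⟩
  rcases h : pvOut m0 m1 m2 M0 M1 M2 (x, y, z) with _ | _ <;>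
    simp_all [pvInB, pvOut, Bool.or_eq_true, Bool.or_eq_false_iff, decide_eq_true_eq,
      decide_eq_false_iff_not] <;> omega

theorem pvFoldA_spec (cloud : List PVC) (m0 m1 m2 M0 M1 M2 : Int) (p : PVC) (ds : List PVC) :
    ∀ (c : Int) (vis : Std.TreeSet PVC pvCmp) (q : List PVC),
    ((m0-1, m1-1, m2-1) : PVC) ∈ vis →
    (∀ x : PVC, x ∈ vis → x ∈ cloud → x = ((m0-1, m1-1, m2-1) : PVC)) →
    ∃ new : List PVC,
      (ds.foldl (pvStepA cloud m0 m1 m2 M0 M1 M2 p) (c, vis, q)).1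
        = c + ((ds.filter (fun d => !pvOut m0 m1 m2 M0 M1 M2 (pvAdd p d) &&
              decide (pvAdd p d ∈ cloud) && !decide (pvAdd p d = ((m0-1, m1-1, m2-1) : PVC)))).length : Int)
      ∧ (ds.foldl (pvStepA cloud m0 m1 m2 M0 M1 M2 p) (c, vis, q)).2.2 = q ++ new
      ∧ (∀ x : PVC, x ∈ (ds.foldl (pvStepA cloud m0 m1 m2 M0 M1 M2 p) (c, vis, q)).2.1
            ↔ (x ∈ vis ∨ x ∈ new))
      ∧ new.Nodup
      ∧ (∀ x ∈ new, (!pvOut m0 m1 m2 M0 M1 M2 x) = true ∧ x ∉ cloud ∧ ¬ x ∈ vis)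
      ∧ (∀ d ∈ ds, (!pvOut m0 m1 m2 M0 M1 M2 (pvAdd p d)) = true → pvAdd p d ∉ cloud →
            pvAdd p d ∈ (ds.foldl (pvStepA cloud m0 m1 m2 M0 M1 M2 p) (c, vis, q)).2.1) := by
  induction ds with
  | nil =>
    intro c vis q _ _
    exact ⟨[], by simp, by simp, by simp, by simp, by simp, by simp⟩
  | cons d ds ih =>
    intro c vis q hst hinv
    by_cases hout : pvOut m0 m1 m2 M0 M1 M2 (pvAdd p d) = true
    · obtain ⟨new, h1, h2, h3, h4, h5, h6⟩ := ih c vis q hst hinv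
      have hstep : pvStepA cloud m0 m1 m2 M0 M1 M2 p (c, vis, q) d = (c, vis, q) := by
        simp [pvStepA, hout]
      refine ⟨new, ?_, ?_, ?_, h4, h5, ?_⟩
      · rw [List.foldl_cons, hstep, h1, List.filter_cons]
        simp [hout]
      · rw [List.foldl_cons, hstep, h2]
      · rw [List.foldl_cons, hstep]; exact h3
      · intro d' hd' ha1 ha2
        rcases List.mem_cons.mp hd' with rfl | hd'
        · simp [hout] at ha1
        · rw [List.foldl_cons, hstep]; exact h6 d' hd' ha1 ha2
    · rw [Bool.not_eq_true] at hout
      by_cases hvis : pvAdd p d ∈ vis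
      · have hc : vis.contains (pvAdd p d) = true := (pvT_contains_iff _ _).mpr hvis
        have hstep : pvStepA cloud m0 m1 m2 M0 M1 M2 p (c, vis, q) d = (c, vis, q) := by
          simp [pvStepA, hout, hc]
        obtain ⟨new, h1, h2, h3, h4, h5, h6⟩ := ih c vis q hst hinv
        have hcond : (!pvOut m0 m1 m2 M0 M1 M2 (pvAdd p d) &&
            decide (pvAdd p d ∈ cloud) && !decide (pvAdd p d = ((m0-1, m1-1, m2-1) : PVC))) = false := by
          by_cases hcl : pvAdd p d ∈ cloud
          · have := hinv _ hvis hcl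
            simp [this]
          · simp [hcl]
        refine ⟨new, ?_, ?_, ?_, h4, h5, ?_⟩
        · rw [List.foldl_cons, hstep, h1, List.filter_cons, hcond]
          simp
        · rw [List.foldl_cons, hstep, h2]
        · rw [List.foldl_cons, hstep]; exact h3
        · intro d' hd' ha1 ha2
          rcases List.mem_cons.mp hd' with rfl | hd'
          · rw [List.foldl_cons, hstep]
            exact (h3 _).mpr (Or.inl hvis)
          · rw [List.foldl_cons, hstep]; exact h6 d' hd' ha1 ha2
      · have hc : vis.contains (pvAdd p d) = false := by
          rw [← Bool.not_eq_true, pvT_contains_iff]; exact hvis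
        by_cases hcl : pvAdd p d ∈ cloud
        · have hne : pvAdd p d ≠ ((m0-1, m1-1, m2-1) : PVC) := fun h => hvis (h ▸ hst)
          have hstep : pvStepA cloud m0 m1 m2 M0 M1 M2 p (c, vis, q) d = (c+1, vis, q) := by
            simp [pvStepA, hout, hc, hcl]
          obtain ⟨new, h1, h2, h3, h4, h5, h6⟩ := ih (c+1) vis q hst hinv
          have hcond : (!pvOut m0 m1 m2 M0 M1 M2 (pvAdd p d) &&
              decide (pvAdd p d ∈ cloud) && !decide (pvAdd p d = ((m0-1, m1-1, m2-1) : PVC))) = true := by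
            simp [hout, hcl, hne]
          refine ⟨new, ?_, ?_, ?_, h4, h5, ?_⟩
          · rw [List.foldl_cons, hstep, h1, List.filter_cons, hcond]
            simp only [if_pos, List.length_cons]
            push_cast
            ring
          · rw [List.foldl_cons, hstep, h2]
          · rw [List.foldl_cons, hstep]; exact h3
          · intro d' hd' ha1 ha2
            rcases List.mem_cons.mp hd' with rfl | hd'
            · exact absurd hcl ha2
            · rw [List.foldl_cons, hstep]; exact h6 d' hd' ha1 ha2
        · have hstep : pvStepA cloud m0 m1 m2 M0 M1 M2 p (c, vis, q) d
              = (c, vis.insert (pvAdd p d), q ++ [pvAdd p d]) := by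
            simp [pvStepA, hout, hc, hcl]
          obtain ⟨new, h1, h2, h3, h4, h5, h6⟩ :=
            ih c (vis.insert (pvAdd p d)) (q ++ [pvAdd p d])
              ((pvT_mem_insert _ _ _).mpr (Or.inr hst))
              (by
                intro x hx hxc
                rcases (pvT_mem_insert _ _ _).mp hx with rfl | hx
                · exact absurd hxc hcl
                · exact hinv x hx hxc)
          have hcond : (!pvOut m0 m1 m2 M0 M1 M2 (pvAdd p d) &&
              decide (pvAdd p d ∈ cloud) && !decide (pvAdd p d = ((m0-1, m1-1, m2-1) : PVC))) = false := by
            simp [hcl]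
          refine ⟨pvAdd p d :: new, ?_, ?_, ?_, ?_, ?_, ?_⟩
          · rw [List.foldl_cons, hstep, h1, List.filter_cons, hcond]
            simp
          · rw [List.foldl_cons, hstep, h2, List.append_assoc]
            rfl
          · intro x
            rw [List.foldl_cons, hstep, h3 x, pvT_mem_insert]
            rw [List.mem_cons]
            tauto
          · refine List.Nodup.cons ?_ h4
            intro hmem
            exact (h5 _ hmem).2.2 ((pvT_mem_insert _ _ _).mpr (Or.inl rfl))
          · intro x hx
            rcases List.mem_cons.mp hx with rfl | hx
            · exact ⟨by simp [hout], hcl, hvis⟩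
            · obtain ⟨hp1, hp2, hp3⟩ := h5 x hx
              exact ⟨hp1, hp2, fun hxv => hp3 ((pvT_mem_insert _ _ _).mpr (Or.inr hxv))⟩
          · intro d' hd' ha1 ha2
            rcases List.mem_cons.mp hd' with rfl | hd'
            · rw [List.foldl_cons, hstep]
              exact (h3 _).mpr (Or.inl ((pvT_mem_insert _ _ _).mpr (Or.inl rfl)))
            · rw [List.foldl_cons, hstep]; exact h6 d' hd' ha1 ha2

theorem pvLoopA_spec (cloud : List PVC) (m0 m1 m2 M0 M1 M2 : Int) :
    ∀ (fuel : Nat) (c : Int) (vis : Std.TreeSet PVC pvCmp) (visF : Finset PVC) (q : List PVC),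
    (∀ x : PVC, x ∈ vis ↔ x ∈ visF) → q.Nodup → (∀ x ∈ q, x ∈ visF) →
    ((m0-1, m1-1, m2-1) : PVC) ∈ visF →
    (∀ x ∈ visF, x = ((m0-1, m1-1, m2-1) : PVC) ∨ ((!pvOut m0 m1 m2 M0 M1 M2 x) = true ∧ x ∉ cloud)) →
    7 * ((pvBox m0 m1 m2 M0 M1 M2 \ visF).card) + q.length ≤ fuel →
    (pvLoopA cloud m0 m1 m2 M0 M1 M2 fuel (c, vis, q)).2.2 = [] ∧
    visF ⊆ (pvLoopA cloud m0 m1 m2 M0 M1 M2 fuel (c, vis, q)).2.1.toList.toFinset ∧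
    (∀ x ∈ (pvLoopA cloud m0 m1 m2 M0 M1 M2 fuel (c, vis, q)).2.1.toList.toFinset,
        x = ((m0-1, m1-1, m2-1) : PVC) ∨ ((!pvOut m0 m1 m2 M0 M1 M2 x) = true ∧ x ∉ cloud)) ∧
    (∀ p ∈ q, ∀ d ∈ pvDirs, (!pvOut m0 m1 m2 M0 M1 M2 (pvAdd p d)) = true → pvAdd p d ∉ cloud →
        pvAdd p d ∈ (pvLoopA cloud m0 m1 m2 M0 M1 M2 fuel (c, vis, q)).2.1.toList.toFinset) ∧
    (pvLoopA cloud m0 m1 m2 M0 M1 M2 fuel (c, vis, q)).1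
      = c + ∑ e ∈ (pvLoopA cloud m0 m1 m2 M0 M1 M2 fuel (c, vis, q)).2.1.toList.toFinset \ (visF \ q.toFinset),
          pvFaceZ cloud m0 m1 m2 M0 M1 M2 e := by
  intro fuel
  induction fuel with
  | zero =>
    intro c vis visF q hmem hqn hqv hst hchar hfuel
    have hq0 : q = [] := List.length_eq_zero_iff.mp (by omega)
    subst hq0
    have hT : (pvLoopA cloud m0 m1 m2 M0 M1 M2 0 (c, vis, [])).2.1.toList.toFinset = visF := by
      ext x
      rw [pvT_mem_toFinset]
      exact hmem x
    refine ⟨rfl, by rw [hT], by rw [hT]; exact hchar, by simp, ?_⟩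
    rw [hT]
    simp [pvLoopA]
  | succ fuel ih =>
    intro c vis visF q hmem hqn hqv hst hchar hfuel
    cases q with
    | nil =>
      have hT : (pvLoopA cloud m0 m1 m2 M0 M1 M2 (fuel+1) (c, vis, [])).2.1.toList.toFinset = visF := by
        ext x
        rw [pvT_mem_toFinset]
        exact hmem x
      refine ⟨rfl, by rw [hT], by rw [hT]; exact hchar, by simp, ?_⟩
      rw [hT]
      simp [pvLoopA]
    | cons p rest =>
      have hinv : ∀ x : PVC, x ∈ vis → x ∈ cloud → x = ((m0-1, m1-1, m2-1) : PVC) := by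
        intro x hx hxc
        rcases hchar x ((hmem x).mp hx) with h | h
        · exact h
        · exact absurd hxc h.2
      obtain ⟨new, hf1, hf2, hf3, hf4, hf5, hf6⟩ :=
        pvFoldA_spec cloud m0 m1 m2 M0 M1 M2 p pvDirs c vis rest
          ((hmem _).mpr hst) hinv
      have hdisjF : ∀ x ∈ new, x ∉ visF := by
        intro x hx hxF
        exact (hf5 x hx).2.2 ((hmem x).mpr hxF)
      -- the fold result state
      set R := pvDirs.foldl (pvStepA cloud m0 m1 m2 M0 M1 M2 p) (c, vis, rest) with hR
      have hrw : pvLoopA cloud m0 m1 m2 M0 M1 M2 (fuel+1) (c, vis, p :: rest)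
          = pvLoopA cloud m0 m1 m2 M0 M1 M2 fuel R := rfl
      have hmem' : ∀ x : PVC, x ∈ R.2.1 ↔ x ∈ visF ∪ new.toFinset := by
        intro x
        rw [hf3 x, Finset.mem_union, List.mem_toFinset, hmem]
      have hqn' : (rest ++ new).Nodup :=
        List.Nodup.append (List.Nodup.of_cons hqn) hf4
          (fun a ha hb => hdisjF a hb (hqv a (List.mem_cons_of_mem p ha)))
      have hqv' : ∀ x ∈ rest ++ new, x ∈ visF ∪ new.toFinset := by
        intro x hx
        rcases List.mem_append.mp hx with hx | hx
        · exact Finset.mem_union_left _ (hqv x (List.mem_cons_of_mem p hx))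
        · exact Finset.mem_union_right _ (List.mem_toFinset.mpr hx)
      have hst' : ((m0-1, m1-1, m2-1) : PVC) ∈ visF ∪ new.toFinset :=
        Finset.mem_union_left _ hst
      have hchar' : ∀ x ∈ visF ∪ new.toFinset,
          x = ((m0-1, m1-1, m2-1) : PVC) ∨ ((!pvOut m0 m1 m2 M0 M1 M2 x) = true ∧ x ∉ cloud) := by
        intro x hx
        rcases Finset.mem_union.mp hx with hx | hx
        · exact hchar x hx
        · have := hf5 x (List.mem_toFinset.mp hx)
          exact Or.inr ⟨this.1, this.2.1⟩
      have hsub : new.toFinset ⊆ pvBox m0 m1 m2 M0 M1 M2 \ visF := by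
        intro x hx
        rw [List.mem_toFinset] at hx
        rw [Finset.mem_sdiff, pv_mem_box_iff]
        exact ⟨(hf5 x hx).1, hdisjF x hx⟩
      have hcardnew : new.toFinset.card = new.length := List.toFinset_card_of_nodup hf4
      have hsd : pvBox m0 m1 m2 M0 M1 M2 \ (visF ∪ new.toFinset)
          = (pvBox m0 m1 m2 M0 M1 M2 \ visF) \ new.toFinset := by
        ext x
        simp only [Finset.mem_sdiff, Finset.mem_union]
        tauto
      have hcard : (pvBox m0 m1 m2 M0 M1 M2 \ (visF ∪ new.toFinset)).card
          = (pvBox m0 m1 m2 M0 M1 M2 \ visF).card - new.length := by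
        rw [hsd, Finset.card_sdiff, Finset.inter_eq_left.mpr hsub, hcardnew]
      have hle : new.length ≤ (pvBox m0 m1 m2 M0 M1 M2 \ visF).card :=
        hcardnew ▸ Finset.card_le_card hsub
      have hfuel' : 7 * (pvBox m0 m1 m2 M0 M1 M2 \ (visF ∪ new.toFinset)).card
          + (rest ++ new).length ≤ fuel := by
        rw [hcard, List.length_append]
        simp only [List.length_cons] at hfuel
        omega
      obtain ⟨h1, h2, h3, h4, h5⟩ :=
        ih R.1 R.2.1 (visF ∪ new.toFinset) (rest ++ new) hmem' hqn' hqv' hst' hchar' hfuel'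
      have hstate : R = (R.1, R.2.1, rest ++ new) := by rw [← hf2]
      have hrw2 : pvLoopA cloud m0 m1 m2 M0 M1 M2 (fuel+1) (c, vis, p :: rest)
          = pvLoopA cloud m0 m1 m2 M0 M1 M2 fuel (R.1, R.2.1, rest ++ new) := by
        rw [hrw]; conv_lhs => rw [hstate]
      rw [hrw2]
      have hpvis : p ∈ visF := hqv p (List.mem_cons_self)
      have hprest : p ∉ rest := (List.nodup_cons.mp hqn).1
      refine ⟨h1, ?_, h3, ?_, ?_⟩
      · intro x hx; exact h2 (Finset.mem_union_left _ hx)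
      · intro p0 hp0 d hd ha1 ha2
        rcases List.mem_cons.mp hp0 with rfl | hp0
        · have := hf6 d hd ha1 ha2
          have hxm : pvAdd p0 d ∈ visF ∪ new.toFinset := (hmem' _).mp this
          exact h2 hxm
        · exact h4 p0 (List.mem_append_left _ hp0) d hd ha1 ha2
      · rw [h5]
        have hX : (visF ∪ new.toFinset) \ (rest ++ new).toFinset
            = visF \ rest.toFinset := by
          ext x
          simp only [Finset.mem_sdiff, Finset.mem_union, List.toFinset_append,
            List.mem_toFinset]
          constructor
          · rintro ⟨h | h, hn⟩
            · exact ⟨h, fun hr => hn (Or.inl hr)⟩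
            · exact absurd (Or.inr h) (by simpa using hn)
          · rintro ⟨hv, hr⟩
            refine ⟨Or.inl hv, ?_⟩
            rintro (h | h)
            · exact hr h
            · exact hdisjF x h hv
        have hA0 : visF \ (p :: rest).toFinset
            = (visF \ rest.toFinset).erase p := by
          ext x
          simp only [Finset.mem_sdiff, List.toFinset_cons, Finset.mem_insert,
            Finset.mem_erase, List.mem_toFinset]
          tauto
        have hpT : p ∈ (pvLoopA cloud m0 m1 m2 M0 M1 M2 fuel
            (R.1, R.2.1, rest ++ new)).2.1.toList.toFinset :=
          h2 (Finset.mem_union_left _ hpvis)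
        have hpX : p ∈ visF \ rest.toFinset := by
          rw [Finset.mem_sdiff, List.mem_toFinset]
          exact ⟨hpvis, hprest⟩
        have hTX : (pvLoopA cloud m0 m1 m2 M0 M1 M2 fuel
              (R.1, R.2.1, rest ++ new)).2.1.toList.toFinset
              \ ((visF \ rest.toFinset).erase p)
            = insert p ((pvLoopA cloud m0 m1 m2 M0 M1 M2 fuel
              (R.1, R.2.1, rest ++ new)).2.1.toList.toFinset
              \ (visF \ rest.toFinset)) := by
          ext x
          simp only [Finset.mem_sdiff, Finset.mem_erase, Finset.mem_insert]
          by_cases hxp : x = p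
          · subst hxp; simp [hpT]
          · tauto
        have hpnot : p ∉ (pvLoopA cloud m0 m1 m2 M0 M1 M2 fuel
              (R.1, R.2.1, rest ++ new)).2.1.toList.toFinset
              \ (visF \ rest.toFinset) := by
          simp [Finset.mem_sdiff, hpX]
        rw [hX, hA0, hTX, Finset.sum_insert hpnot, hf1]
        have hface : pvFaceZ cloud m0 m1 m2 M0 M1 M2 p
            = ((pvDirs.filter (fun d => !pvOut m0 m1 m2 M0 M1 M2 (pvAdd p d) &&
                decide (pvAdd p d ∈ cloud) &&
                !decide (pvAdd p d = ((m0-1, m1-1, m2-1) : PVC)))).length : Int) := rfl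
        rw [hface]
        ring

-- lockstep: B's flood fill is A's with the counter stripped
theorem pvStepB_proj (cloud cloudset : List PVC) (m0 m1 m2 M0 M1 M2 : Int) (p : PVC)
    (hmem : ∀ a : PVC, a ∈ cloudset ↔ a ∈ cloud) (c : Int)
    (vis : Std.TreeSet PVC pvCmp) (q : List PVC) (d : PVC) :
    pvStepB cloudset (m0-1, m1-1, m2-1) (M0+1, M1+1, M2+1) p (vis, q) d
      = ((pvStepA cloud m0 m1 m2 M0 M1 M2 p (c, vis, q) d).2.1,
         (pvStepA cloud m0 m1 m2 M0 M1 M2 p (c, vis, q) d).2.2) := by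
  by_cases hout : pvOut m0 m1 m2 M0 M1 M2 (pvAdd p d) = true <;>
  by_cases hvis : vis.contains (pvAdd p d) = true <;>
  by_cases hcl : pvAdd p d ∈ cloud <;>
    simp_all [pvStepB, pvStepA, pv_inB_eq_not_out, hmem]

theorem pvFoldB_proj (cloud cloudset : List PVC) (m0 m1 m2 M0 M1 M2 : Int) (p : PVC)
    (hmem : ∀ a : PVC, a ∈ cloudset ↔ a ∈ cloud) (ds : List PVC) :
    ∀ (c : Int) (vis : Std.TreeSet PVC pvCmp) (q : List PVC),
    ds.foldl (pvStepB cloudset (m0-1, m1-1, m2-1) (M0+1, M1+1, M2+1) p) (vis, q)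
      = ((ds.foldl (pvStepA cloud m0 m1 m2 M0 M1 M2 p) (c, vis, q)).2.1,
         (ds.foldl (pvStepA cloud m0 m1 m2 M0 M1 M2 p) (c, vis, q)).2.2) := by
  induction ds with
  | nil => intro c vis q; rfl
  | cons d ds ih =>
    intro c vis q
    rw [List.foldl_cons, List.foldl_cons,
      pvStepB_proj cloud cloudset m0 m1 m2 M0 M1 M2 p hmem c vis q d]
    have := ih (pvStepA cloud m0 m1 m2 M0 M1 M2 p (c, vis, q) d).1
      (pvStepA cloud m0 m1 m2 M0 M1 M2 p (c, vis, q) d).2.1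
      (pvStepA cloud m0 m1 m2 M0 M1 M2 p (c, vis, q) d).2.2
    simpa using this

theorem pvLoopB_proj (cloud cloudset : List PVC) (m0 m1 m2 M0 M1 M2 : Int)
    (hmem : ∀ a : PVC, a ∈ cloudset ↔ a ∈ cloud) :
    ∀ (fuel : Nat) (c : Int) (vis : Std.TreeSet PVC pvCmp) (q : List PVC),
    pvLoopB cloudset (m0-1, m1-1, m2-1) (M0+1, M1+1, M2+1) fuel (vis, q)
      = ((pvLoopA cloud m0 m1 m2 M0 M1 M2 fuel (c, vis, q)).2.1,
         (pvLoopA cloud m0 m1 m2 M0 M1 M2 fuel (c, vis, q)).2.2) := by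
  intro fuel
  induction fuel with
  | zero => intro c vis q; rfl
  | succ fuel ih =>
    intro c vis q
    cases q with
    | nil => rfl
    | cons p rest =>
      show pvLoopB cloudset _ _ fuel (pvDirs.foldl (pvStepB cloudset _ _ p) (vis, rest)) = _
      rw [pvFoldB_proj cloud cloudset m0 m1 m2 M0 M1 M2 p hmem pvDirs c vis rest]
      have := ih (pvDirs.foldl (pvStepA cloud m0 m1 m2 M0 M1 M2 p) (c, vis, rest)).1
        (pvDirs.foldl (pvStepA cloud m0 m1 m2 M0 M1 M2 p) (c, vis, rest)).2.1
        (pvDirs.foldl (pvStepA cloud m0 m1 m2 M0 M1 M2 p) (c, vis, rest)).2.2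
      simpa using this

-- counting fold shapes
theorem pv_foldl_count (p : PVC → Bool) :
    ∀ (l : List PVC) (t : Int),
    l.foldl (fun t d => if p d then t + 1 else t) t = t + ((l.filter p).length : Int) := by
  intro l
  induction l with
  | nil => simp
  | cons d l ih =>
    intro t
    by_cases h : p d <;> simp [h, ih] <;> push_cast <;> ring

theorem pv_foldl_if_add (q : PVC → Bool) (g : PVC → Int) :
    ∀ (l : List PVC) (t : Int),
    l.foldl (fun t c => if q c then t + g c else t) t = t + ((l.filter q).map g).sum := by
  intro l
  induction l with
  | nil => simp
  | cons c l ih =>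
    intro t
    by_cases h : q c <;> simp [h, ih] <;> ring

-- face-pair double counting: sum over exterior cells = sum over cloud cells
theorem pv_sum_card_filter {α β : Type} [DecidableEq α] [DecidableEq β]
    (V : Finset α) (D : Finset β) (P : α → β → Prop) [∀ a b, Decidable (P a b)] :
    ∑ e ∈ V, (D.filter (P e)).card = ((V ×ˢ D).filter (fun x => P x.1 x.2)).card := by
  rw [Finset.card_filter, Finset.sum_product]
  exact Finset.sum_congr rfl fun e _ => by rw [Finset.card_filter]

theorem pv_dirs_nodup : pvDirs.Nodup := by decide

theorem pv_neg_mem : ∀ d ∈ pvDirs, pvNeg d ∈ pvDirs := by decide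

theorem pv_add_neg (e d : PVC) : pvAdd (pvAdd e d) (pvNeg d) = e := by
  rcases e with ⟨e1, e2, e3⟩; rcases d with ⟨d1, d2, d3⟩
  simp [pvAdd, pvNeg]

theorem pv_neg_neg (d : PVC) : pvNeg (pvNeg d) = d := by
  rcases d with ⟨d1, d2, d3⟩; simp [pvNeg]

-- the BFS result state and derived objects
def pvR (cloud : List PVC) (m0 m1 m2 M0 M1 M2 : Int) : Int × Std.TreeSet PVC pvCmp × List PVC :=
  pvLoopA cloud m0 m1 m2 M0 M1 M2 (pvFuel (m0-1, m1-1, m2-1) (M0+1, M1+1, M2+1))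
    (0, (Std.TreeSet.empty : Std.TreeSet PVC pvCmp).insert (m0-1, m1-1, m2-1), [(m0-1, m1-1, m2-1)])

def pvV (cloud : List PVC) (m0 m1 m2 M0 M1 M2 : Int) : Finset PVC :=
  (pvR cloud m0 m1 m2 M0 M1 M2).2.1.toList.toFinset

theorem pv_R_props (cloud : List PVC) (m0 m1 m2 M0 M1 M2 : Int) :
    ((m0-1, m1-1, m2-1) : PVC) ∈ pvV cloud m0 m1 m2 M0 M1 M2 ∧
    (∀ x ∈ pvV cloud m0 m1 m2 M0 M1 M2,
      x = ((m0-1, m1-1, m2-1) : PVC) ∨ ((!pvOut m0 m1 m2 M0 M1 M2 x) = true ∧ x ∉ cloud)) ∧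
    (pvR cloud m0 m1 m2 M0 M1 M2).1
      = ∑ e ∈ pvV cloud m0 m1 m2 M0 M1 M2, pvFaceZ cloud m0 m1 m2 M0 M1 M2 e := by
  have hboxcard : (pvBox m0 m1 m2 M0 M1 M2).card
      = (M0+1+1-(m0-1)).toNat * ((M1+1+1-(m1-1)).toNat * (M2+1+1-(m2-1)).toNat) := by
    simp [pvBox, Finset.card_product, Int.card_Icc]
  have hfuel : 7 * ((pvBox m0 m1 m2 M0 M1 M2 \ ({((m0-1, m1-1, m2-1) : PVC)} : Finset PVC)).card) + 1
      ≤ pvFuel (m0-1, m1-1, m2-1) (M0+1, M1+1, M2+1) := by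
    have h1 : (pvBox m0 m1 m2 M0 M1 M2 \ ({((m0-1, m1-1, m2-1) : PVC)} : Finset PVC)).card
        ≤ (pvBox m0 m1 m2 M0 M1 M2).card := Finset.card_le_card (Finset.sdiff_subset)
    have h2 : pvFuel ((m0-1, m1-1, m2-1) : PVC) ((M0+1, M1+1, M2+1) : PVC)
        = 7 * ((M0+1+1-(m0-1)).toNat * ((M1+1+1-(m1-1)).toNat * (M2+1+1-(m2-1)).toNat)) + 1 := rfl
    omega
  have hmem0 : ∀ x : PVC,
      x ∈ (Std.TreeSet.empty : Std.TreeSet PVC pvCmp).insert (m0-1, m1-1, m2-1)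
        ↔ x ∈ ({((m0-1, m1-1, m2-1) : PVC)} : Finset PVC) := by
    intro x
    rw [pvT_mem_insert, Finset.mem_singleton]
    simp
  obtain ⟨h1, h2, h3, h4, h5⟩ := pvLoopA_spec cloud m0 m1 m2 M0 M1 M2
    (pvFuel (m0-1, m1-1, m2-1) (M0+1, M1+1, M2+1)) 0
    ((Std.TreeSet.empty : Std.TreeSet PVC pvCmp).insert (m0-1, m1-1, m2-1))
    ({((m0-1, m1-1, m2-1) : PVC)} : Finset PVC)
    [((m0-1, m1-1, m2-1) : PVC)]
    hmem0 (by simp) (by intro x hx; simpa using hx) (Finset.mem_singleton_self _)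
    (by intro x hx; rw [Finset.mem_singleton] at hx; exact Or.inl hx) hfuel
  refine ⟨h2 (Finset.mem_singleton_self _), h3, ?_⟩
  · show (pvLoopA cloud m0 m1 m2 M0 M1 M2
        (pvFuel (m0-1, m1-1, m2-1) (M0+1, M1+1, M2+1))
        (0, (Std.TreeSet.empty : Std.TreeSet PVC pvCmp).insert (m0-1, m1-1, m2-1),
          [((m0-1, m1-1, m2-1) : PVC)])).1 = _
    rw [h5]
    have : ({((m0-1, m1-1, m2-1) : PVC)} : Finset PVC)
        \ ([((m0-1, m1-1, m2-1) : PVC)]).toFinset = ∅ := by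
      simp
    rw [this, Finset.sdiff_empty]
    simp [pvV, pvR]

-- the pair bijection: faces counted from the exterior side = faces counted from the cloud side
theorem pv_card_bij (m0 m1 m2 M0 M1 M2 : Int) (V cf : Finset PVC) :
    ((V ×ˢ pvDirs.toFinset).filter (fun x => (!pvOut m0 m1 m2 M0 M1 M2 (pvAdd x.1 x.2)) = true ∧
        pvAdd x.1 x.2 ∈ cf ∧ pvAdd x.1 x.2 ≠ ((m0-1, m1-1, m2-1) : PVC))).card
    = ((cf ×ˢ pvDirs.toFinset).filter (fun x => ((!pvOut m0 m1 m2 M0 M1 M2 x.1) = true ∧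
        x.1 ≠ ((m0-1, m1-1, m2-1) : PVC)) ∧ pvAdd x.1 x.2 ∈ V)).card := by
  apply Finset.card_bij' (i := fun x _ => (pvAdd x.1 x.2, pvNeg x.2))
    (j := fun x _ => (pvAdd x.1 x.2, pvNeg x.2))
  · intro a ha
    rw [Finset.mem_filter, Finset.mem_product] at ha ⊢
    obtain ⟨⟨haV, haD⟩, hP1, hP2, hP3⟩ := ha
    rw [List.mem_toFinset] at haD
    refine ⟨⟨hP2, List.mem_toFinset.mpr (pv_neg_mem _ haD)⟩, ⟨hP1, hP3⟩, ?_⟩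
    rw [pv_add_neg]; exact haV
  · intro b hb
    rw [Finset.mem_filter, Finset.mem_product] at hb ⊢
    obtain ⟨⟨hbc, hbD⟩, ⟨hQ1, hQ2⟩, hQ3⟩ := hb
    rw [List.mem_toFinset] at hbD
    refine ⟨⟨hQ3, List.mem_toFinset.mpr (pv_neg_mem _ hbD)⟩, ?_, ?_, ?_⟩
    · rw [pv_add_neg]; exact hQ1
    · rw [pv_add_neg]; exact hbc
    · rw [pv_add_neg]; exact hQ2
  · intro a _; rw [pv_add_neg, pv_neg_neg]
  · intro b _; rw [pv_add_neg, pv_neg_neg]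

theorem pv_filter_length_card (p : PVC → Bool) (P : PVC → Prop) [DecidablePred P]
    (h : ∀ d ∈ pvDirs, (p d = true ↔ P d)) :
    (pvDirs.filter p).length = (pvDirs.toFinset.filter P).card := by
  rw [← List.toFinset_card_of_nodup (List.Nodup.filter p pv_dirs_nodup)]
  congr 1
  ext d
  simp only [List.mem_toFinset, List.mem_filter, Finset.mem_filter]
  constructor
  · rintro ⟨h1, h2⟩; exact ⟨h1, (h d h1).mp h2⟩
  · rintro ⟨h1, h2⟩; exact ⟨h1, (h d h1).mpr h2⟩

theorem pv_B_eq (cloud : List PVC) (m0 m1 m2 M0 M1 M2 : Int) :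
    (PySem.Set.ofList cloud).foldl
      (fun t c =>
        if pvInB (m0-1, m1-1, m2-1) (M0+1, M1+1, M2+1) c
            && !(pvLoopB (PySem.Set.ofList cloud) (m0-1, m1-1, m2-1)
                (M0+1, M1+1, M2+1) (pvFuel (m0-1, m1-1, m2-1) (M0+1, M1+1, M2+1))
                ((Std.TreeSet.empty : Std.TreeSet PVC pvCmp).insert (m0-1, m1-1, m2-1),
                  [(m0-1, m1-1, m2-1)])).1.contains c then
          pvDirs.foldl (fun t d =>
            if (pvLoopB (PySem.Set.ofList cloud) (m0-1, m1-1, m2-1)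
                (M0+1, M1+1, M2+1) (pvFuel (m0-1, m1-1, m2-1) (M0+1, M1+1, M2+1))
                ((Std.TreeSet.empty : Std.TreeSet PVC pvCmp).insert (m0-1, m1-1, m2-1),
                  [(m0-1, m1-1, m2-1)])).1.contains (pvAdd c d)
            then t + 1 else t) t
        else t) 0
    = (pvR cloud m0 m1 m2 M0 M1 M2).1 := by
  have hmem : ∀ a : PVC, a ∈ PySem.Set.ofList cloud ↔ a ∈ cloud := by
    intro a; simp [PySem.Set.mem_ofList]
  have hext : (pvLoopB (PySem.Set.ofList cloud) (m0-1, m1-1, m2-1) (M0+1, M1+1, M2+1)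
      (pvFuel (m0-1, m1-1, m2-1) (M0+1, M1+1, M2+1))
      ((Std.TreeSet.empty : Std.TreeSet PVC pvCmp).insert (m0-1, m1-1, m2-1),
        [(m0-1, m1-1, m2-1)])).1
      = (pvR cloud m0 m1 m2 M0 M1 M2).2.1 := by
    rw [pvLoopB_proj cloud (PySem.Set.ofList cloud) m0 m1 m2 M0 M1 M2 hmem
      (pvFuel (m0-1, m1-1, m2-1) (M0+1, M1+1, M2+1)) 0
      ((Std.TreeSet.empty : Std.TreeSet PVC pvCmp).insert (m0-1, m1-1, m2-1)) [(m0-1, m1-1, m2-1)]]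
    rfl
  rw [hext]
  obtain ⟨hseed, hchar, hAsum⟩ := pv_R_props cloud m0 m1 m2 M0 M1 M2
  have hinner : (fun (t : Int) (c : PVC) =>
      if pvInB (m0-1, m1-1, m2-1) (M0+1, M1+1, M2+1) c
          && !(pvR cloud m0 m1 m2 M0 M1 M2).2.1.contains c then
        pvDirs.foldl (fun t d =>
          if (pvR cloud m0 m1 m2 M0 M1 M2).2.1.contains (pvAdd c d) then t + 1 else t) t
      else t)
      = (fun (t : Int) (c : PVC) =>
      if pvInB (m0-1, m1-1, m2-1) (M0+1, M1+1, M2+1) c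
          && !(pvR cloud m0 m1 m2 M0 M1 M2).2.1.contains c then
        t + (((pvDirs.toFinset.filter
            (fun d => pvAdd c d ∈ pvV cloud m0 m1 m2 M0 M1 M2)).card : Nat) : Int)
      else t) := by
    funext t c
    rw [pv_foldl_count (fun d => (pvR cloud m0 m1 m2 M0 M1 M2).2.1.contains (pvAdd c d)) pvDirs t,
      pv_filter_length_card (fun d => (pvR cloud m0 m1 m2 M0 M1 M2).2.1.contains (pvAdd c d))
        (fun d => pvAdd c d ∈ pvV cloud m0 m1 m2 M0 M1 M2)
        (by
          intro d _
          rw [pvT_contains_iff]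
          exact (pvT_mem_toFinset _ _).symm)]
  rw [hinner, pv_foldl_if_add]
  have hLnd : ((PySem.Set.ofList cloud).filter
      (fun c => pvInB (m0-1, m1-1, m2-1) (M0+1, M1+1, M2+1) c
        && !(pvR cloud m0 m1 m2 M0 M1 M2).2.1.contains c)).Nodup :=
    List.Nodup.filter _ (PySem.Set.nodup_ofList cloud)
  rw [← List.sum_toFinset _ hLnd]
  have hLto : ((PySem.Set.ofList cloud).filter
        (fun c => pvInB (m0-1, m1-1, m2-1) (M0+1, M1+1, M2+1) c
          && !(pvR cloud m0 m1 m2 M0 M1 M2).2.1.contains c)).toFinset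
      = cloud.toFinset.filter
        (fun c => (!pvOut m0 m1 m2 M0 M1 M2 c) = true ∧ c ≠ ((m0-1, m1-1, m2-1) : PVC)) := by
    ext a
    simp only [List.mem_toFinset, List.mem_filter, Finset.mem_filter, hmem,
      Bool.and_eq_true, Bool.not_eq_true', pv_inB_eq_not_out, ne_eq]
    constructor
    · rintro ⟨hac, hin, hnc⟩
      refine ⟨hac, hin, ?_⟩
      rintro rfl
      have : ((m0-1, m1-1, m2-1) : PVC) ∈ (pvR cloud m0 m1 m2 M0 M1 M2).2.1 :=
        (pvT_mem_toFinset _ _).mp hseed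
      rw [← pvT_contains_iff] at this
      exact absurd this (by simp [hnc])
    · rintro ⟨hac, hin, hns⟩
      refine ⟨hac, hin, ?_⟩
      rw [← Bool.not_eq_true, pvT_contains_iff]
      intro haV
      rcases hchar a ((pvT_mem_toFinset _ _).mpr haV) with h | h
      · exact hns h
      · exact h.2 hac
  rw [hLto]
  rw [← Nat.cast_sum]
  rw [pv_sum_card_filter (cloud.toFinset.filter
        (fun c => (!pvOut m0 m1 m2 M0 M1 M2 c) = true ∧ c ≠ ((m0-1, m1-1, m2-1) : PVC)))
      pvDirs.toFinset
      (fun c d => pvAdd c d ∈ pvV cloud m0 m1 m2 M0 M1 M2)]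
  have hset : (((cloud.toFinset.filter
        (fun c => (!pvOut m0 m1 m2 M0 M1 M2 c) = true ∧ c ≠ ((m0-1, m1-1, m2-1) : PVC)))
        ×ˢ pvDirs.toFinset).filter
      (fun x => pvAdd x.1 x.2 ∈ pvV cloud m0 m1 m2 M0 M1 M2))
      = ((cloud.toFinset ×ˢ pvDirs.toFinset).filter
        (fun x => ((!pvOut m0 m1 m2 M0 M1 M2 x.1) = true ∧
          x.1 ≠ ((m0-1, m1-1, m2-1) : PVC)) ∧ pvAdd x.1 x.2 ∈ pvV cloud m0 m1 m2 M0 M1 M2)) := by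
    ext x
    simp only [Finset.mem_filter, Finset.mem_product, ne_eq]
    tauto
  rw [hset]
  -- A's count as the mirrored pair count
  have hA : (pvR cloud m0 m1 m2 M0 M1 M2).1
      = (((pvV cloud m0 m1 m2 M0 M1 M2 ×ˢ pvDirs.toFinset).filter
          (fun x => (!pvOut m0 m1 m2 M0 M1 M2 (pvAdd x.1 x.2)) = true ∧
            pvAdd x.1 x.2 ∈ cloud.toFinset ∧
            pvAdd x.1 x.2 ≠ ((m0-1, m1-1, m2-1) : PVC))).card : Int) := by
    rw [hAsum]
    rw [← pv_sum_card_filter (pvV cloud m0 m1 m2 M0 M1 M2) pvDirs.toFinset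
      (fun e d => (!pvOut m0 m1 m2 M0 M1 M2 (pvAdd e d)) = true ∧
        pvAdd e d ∈ cloud.toFinset ∧ pvAdd e d ≠ ((m0-1, m1-1, m2-1) : PVC))]
    rw [Nat.cast_sum]
    refine Finset.sum_congr rfl fun e _ => ?_
    unfold pvFaceZ
    congr 1
    exact pv_filter_length_card _ _
      (by intro d _; simp [List.mem_toFinset, and_assoc])
  have hbij := pv_card_bij m0 m1 m2 M0 M1 M2 (pvV cloud m0 m1 m2 M0 M1 M2) cloud.toFinset
  rw [hA, ← hbij]
  push_cast
  ring

-- bridges from the ports to the analysed cores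
theorem pv_A_bridge (cloud : List PVC) (mins maxs : List Int) :
    count_outer_sides cloud mins maxs
      = (pvR cloud (mins.getD 0 0) (mins.getD 1 0) (mins.getD 2 0)
          (maxs.getD 0 0) (maxs.getD 1 0) (maxs.getD 2 0)).1 := by
  have h0 : PySem.List.pyGetD mins 0 0 = mins.getD 0 0 := PySem.List.pyGetD_natCast mins 0 0
  have h1 : PySem.List.pyGetD mins 1 0 = mins.getD 1 0 := PySem.List.pyGetD_natCast mins 1 0
  have h2 : PySem.List.pyGetD mins 2 0 = mins.getD 2 0 := PySem.List.pyGetD_natCast mins 2 0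
  have h3 : PySem.List.pyGetD maxs 0 0 = maxs.getD 0 0 := PySem.List.pyGetD_natCast maxs 0 0
  have h4 : PySem.List.pyGetD maxs 1 0 = maxs.getD 1 0 := PySem.List.pyGetD_natCast maxs 1 0
  have h5 : PySem.List.pyGetD maxs 2 0 = maxs.getD 2 0 := PySem.List.pyGetD_natCast maxs 2 0
  simp only [count_outer_sides, pvR, h0, h1, h2, h3, h4, h5]

set_option maxHeartbeats 1000000 in
theorem pv_B_bridge (cloud : List PVC) (mins maxs : List Int) :
    count_outer_sides_alt cloud mins maxs
      = (pvR cloud (mins.getD 0 0) (mins.getD 1 0) (mins.getD 2 0)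
          (maxs.getD 0 0) (maxs.getD 1 0) (maxs.getD 2 0)).1 := by
  have h0 : PySem.List.pyGetD mins 0 0 = mins.getD 0 0 := PySem.List.pyGetD_natCast mins 0 0
  have h1 : PySem.List.pyGetD mins 1 0 = mins.getD 1 0 := PySem.List.pyGetD_natCast mins 1 0
  have h2 : PySem.List.pyGetD mins 2 0 = mins.getD 2 0 := PySem.List.pyGetD_natCast mins 2 0
  have h3 : PySem.List.pyGetD maxs 0 0 = maxs.getD 0 0 := PySem.List.pyGetD_natCast maxs 0 0
  have h4 : PySem.List.pyGetD maxs 1 0 = maxs.getD 1 0 := PySem.List.pyGetD_natCast maxs 1 0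
  have h5 : PySem.List.pyGetD maxs 2 0 = maxs.getD 2 0 := PySem.List.pyGetD_natCast maxs 2 0
  rw [← pv_B_eq cloud (mins.getD 0 0) (mins.getD 1 0) (mins.getD 2 0)
    (maxs.getD 0 0) (maxs.getD 1 0) (maxs.getD 2 0)]
  simp only [count_outer_sides_alt, h0, h1, h2, h3, h4, h5]

-- ===== VERDICT (by name: the statement is the Claim_ definition above) =====
theorem count_outer_sides_spec : Claim_equal_count_outer_sides := by
  intro cloud mins maxs hdom hpre
  show count_outer_sides cloud mins maxs = count_outer_sides_alt cloud mins maxs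
  rw [pv_A_bridge, pv_B_bridge]
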